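-- pv_equiv track=rewrite | github.com/amanyrath/spend | src/guardrails/tone_validator.py | validate_tone
-- ===== SOURCE A (Python) =====
-- PROHIBITED_PHRASES = [
--     "overspending",
--     "bad habits",
--     "poor choices",
--     "irresponsible",
--     "wasteful",
--     "you're overspending",
--     "bad habit",
--     "poor choice"
-- ]
--
-- def validate_tone(text: str) -> bool:
--     """Validate that text does not contain prohibited phrases.
--
--     Args:
--         text: Text to validate
--
--     Returns:
--         True if text passes validation (no prohibited phrases found),
--         False if prohibited phrase detected
--     """
--     if not text:
--         return True
--
--     text_lower = text.lower()
--
--     for phrase in PROHIBITED_PHRASES: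
--         if phrase in text_lower:
--             return False
--
--     return True
-- ===== SOURCE B (Python) =====
-- # Scans the text once position by position, testing only the 5 minimal phrases
-- # (the 3 longer list entries each contain a shorter one, so they are redundant).
-- _PHRASES = ("overspending", "bad habit", "poor choice", "irresponsible", "wasteful")
--
--
-- def validate_tone(text: str) -> bool:
--     """Validate that text does not contain prohibited phrases."""
--     if not text:
--         return True
--     t = text.lower()
--     i = 0
--     n = len(t)
--     while i < n:
--         if any(t.startswith(p, i) for p in _PHRASES):
--             return False
--         i += 1
--     return True
-- ===== Notes on version B (the rewrite author's own statement) =====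
-- stated objective: alternative
-- what changed: Replaces the loop of eight independent whole-text substring scans with a single position-by-position scan that tests startswith against the 5 minimal phrases (the 3 redundant longer phrases, each containing a shorter listed one, are dropped).
import Mathlib
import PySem

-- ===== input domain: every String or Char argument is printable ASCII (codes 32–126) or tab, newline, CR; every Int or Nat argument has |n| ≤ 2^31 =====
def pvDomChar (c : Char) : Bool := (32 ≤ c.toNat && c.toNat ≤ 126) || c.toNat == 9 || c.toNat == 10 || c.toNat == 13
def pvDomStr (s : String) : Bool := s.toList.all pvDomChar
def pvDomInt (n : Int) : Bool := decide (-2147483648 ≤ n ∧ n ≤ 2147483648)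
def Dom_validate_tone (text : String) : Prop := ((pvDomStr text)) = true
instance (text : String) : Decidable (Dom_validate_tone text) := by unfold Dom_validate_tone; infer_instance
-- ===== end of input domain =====

-- B scans the lowercased text once, position by position, testing startswith against
-- the 5 minimal phrases only (the 3 redundant longer phrases each contain a shorter
-- listed one); objective: alternative single-pass decomposition, not measured faster.

-- the module constant PROHIBITED_PHRASES
def pvPhrases : List (List Char) :=
  ["overspending".toList, "bad habits".toList, "poor choices".toList,
   "irresponsible".toList, "wasteful".toList, "you're overspending".toList,
   "bad habit".toList, "poor choice".toList]

-- ===== PORT A =====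
-- 'for phrase in PROHIBITED_PHRASES: if phrase in text_lower: return False' / 'return True'
def validate_tone (text : String) : Bool :=
  if text == "" then true
  else
    let text_lower := PySem.Chars.lower text.toList
    !(pvPhrases.any (fun phrase => PySem.Chars.isIn phrase text_lower))

-- ===== PORT B =====
-- Source B's reduced tuple _PHRASES
def pvReduced : List (List Char) :=
  ["overspending".toList, "bad habit".toList, "poor choice".toList,
   "irresponsible".toList, "wasteful".toList]

-- Source B's while loop: advance i over the text, i.e. recurse over the suffixes,
-- returning true as soon as some reduced phrase starts at the current position
def pvScan : List Char → Bool
  | [] => false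
  | c :: rest =>
      if pvReduced.any (fun p => PySem.Chars.startswith (c :: rest) p) then true
      else pvScan rest

def validate_tone_alt (text : String) : Bool :=
  if text == "" then true
  else !(pvScan (PySem.Chars.lower text.toList))

-- ===== PRECONDITION & SPEC =====
def Spec_validate_tone (text : String) (out : Bool) : Prop := out = validate_tone_alt text
instance (text : String) (out : Bool) : Decidable (Spec_validate_tone text out) := by unfold Spec_validate_tone; infer_instance

-- ===== CLAIM =====
def Claim_equal_validate_tone : Prop := ∀ (text : String), Dom_validate_tone text → Spec_validate_tone text (validate_tone text)

-- ===== LEMMAS AND PROOFS =====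

theorem pvReduced_ne_nil : ∀ p ∈ pvReduced, p ≠ [] := by decide

-- every full phrase contains one of the reduced phrases
theorem pvReduced_covers : ∀ p ∈ pvPhrases, ∃ q ∈ pvReduced, q <:+: p := by decide

-- every reduced phrase is itself in the full list
theorem pvReduced_subset : ∀ q ∈ pvReduced, q ∈ pvPhrases := by decide

-- the suffix recursion finds a hit iff some reduced phrase is an infix
theorem pvScan_iff (t : List Char) :
    pvScan t = true ↔ ∃ q ∈ pvReduced, q <:+: t := by
  induction t with
  | nil =>
    simp only [pvScan]
    rw [Bool.false_eq_true, false_iff]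
    rintro ⟨q, hq, hin⟩
    exact pvReduced_ne_nil q hq (List.eq_nil_of_infix_nil hin)
  | cons c rest ih =>
    simp only [pvScan]
    split_ifs with h
    · simp only [true_iff]
      simp only [List.any_eq_true, PySem.Chars.startswith_iff] at h
      obtain ⟨q, hq, hpre⟩ := h
      exact ⟨q, hq, hpre.isInfix⟩
    · rw [ih]
      simp only [List.any_eq_true, PySem.Chars.startswith_iff, not_exists, not_and] at h
      constructor
      · rintro ⟨q, hq, hin⟩; exact ⟨q, hq, hin.trans ((List.suffix_cons c rest).isInfix)⟩
      · rintro ⟨q, hq, hin⟩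
        rcases List.infix_cons_iff.mp hin with hpre | hin'
        · exact absurd hpre (h q hq)
        · exact ⟨q, hq, hin'⟩

-- ===== VERDICT =====
theorem validate_tone_spec : Claim_equal_validate_tone := by
  intro text _
  unfold Spec_validate_tone validate_tone validate_tone_alt
  by_cases h : text = ""
  · simp [h]
  · rw [if_neg (by simpa using h), if_neg (by simpa using h)]
    have key : (pvPhrases.any (fun phrase =>
        PySem.Chars.isIn phrase (PySem.Chars.lower text.toList)))
        = pvScan (PySem.Chars.lower text.toList) := by
      rw [Bool.eq_iff_iff]
      simp only [List.any_eq_true, PySem.Chars.isIn_iff_infix, pvScan_iff]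
      constructor
      · rintro ⟨p, hp, hin⟩
        obtain ⟨q, hq, hqp⟩ := pvReduced_covers p hp
        exact ⟨q, hq, hqp.trans hin⟩
      · rintro ⟨q, hq, hin⟩
        exact ⟨q, pvReduced_subset q hq, hin⟩
    simp only []
    rw [key]
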